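-- pv_equiv track=rewrite | github.com/meng-jack/cmpsc_132 | Final Project/main.py | findSmallestIndex
-- ===== SOURCE A (Python) =====
-- def findSmallestIndex(nums,target):
--         """Finds the smallest index such that all elements after this index are strictly
--         greater than the target.
--
--         Args:
--             nums (list[int]): numbers to search in
--             target (int): target
--
--         Returns:
--             int: the index (-1) if it is not possible
--         """
--         for i in range(len(nums)):
--                 flag=True
--                 r=nums[i+1:] if i+1<len(nums) else []
--                 l=nums[:i]
--                 # check the right side to make sure all numbers
--                 # on the right side are strictly greater
--                 if len(r)==0: # edge case
--                         return -1
--                 r_i=0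
--                 while flag and r_i<len(r):
--                         if r[r_i]<=target:
--                                 flag=False
--                         r_i+=1
--                 if flag:
--                         return i+1
--         return -1
-- ===== SOURCE B (Python) =====
-- def findSmallestIndex(nums, target):
--     # One forward pass: remember the last index whose element is <= target,
--     # then derive the boundary in closed form.
--     last_bad = -1
--     for i, v in enumerate(nums):
--         if v <= target:
--             last_bad = i
--     j = max(1, last_bad + 1)
--     return j if j <= len(nums) - 1 else -1
-- ===== Notes on version B (the rewrite author's own statement) =====
-- stated objective: faster
-- what changed: Replaced A's nested loop (for each i, rescan the whole suffix) with a single forward pass that tracks the last index with an element <= target, deriving the answer as the clamped boundary max(1,last_bad+1) bounded by len(nums)-1.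
import Mathlib
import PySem

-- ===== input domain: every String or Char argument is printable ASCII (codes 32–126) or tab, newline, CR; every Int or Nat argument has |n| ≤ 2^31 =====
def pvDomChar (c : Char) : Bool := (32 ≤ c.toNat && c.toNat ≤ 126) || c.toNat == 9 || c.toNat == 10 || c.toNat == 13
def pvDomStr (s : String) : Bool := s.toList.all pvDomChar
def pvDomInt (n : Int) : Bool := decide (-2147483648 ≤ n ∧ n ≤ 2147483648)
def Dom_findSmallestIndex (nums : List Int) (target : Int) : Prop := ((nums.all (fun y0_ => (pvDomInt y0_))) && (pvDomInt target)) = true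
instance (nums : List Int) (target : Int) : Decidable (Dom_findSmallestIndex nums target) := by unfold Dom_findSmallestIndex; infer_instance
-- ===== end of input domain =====

-- B replaces A's quadratic "for each i, rescan the suffix" with one linear pass tracking
-- the last index whose element is ≤ target, then derives the boundary in closed form (objective: faster).

-- ===== PORT A =====
-- inner `while flag and r_i < len(r)` loop of A: flag stays True iff no scanned element is ≤ target
def pvWhileFlag (target : Int) : List Int → Bool
  | [] => true
  | x :: xs => if x ≤ target then false else pvWhileFlag target xs

-- the `for i in range(len(nums))` loop of A, with its early returns
def pvGoA (nums : List Int) (target : Int) (i : Nat) : Int :=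
  if _h : i < nums.length then
    let r := if (i : Int) + 1 < (nums.length : Int) then
               PySem.List.slice nums (some ((i : Int) + 1)) none else []
    let _l := PySem.List.slice nums none (some (i : Int))   -- Python's unused `l = nums[:i]`
    if r.length = 0 then -1
    else if pvWhileFlag target r then (i : Int) + 1
    else pvGoA nums target (i + 1)
  else -1
termination_by nums.length - i

def findSmallestIndex (nums : List Int) (target : Int) : Int :=
  pvGoA nums target 0

-- ===== PORT B =====
def findSmallestIndex_alt (nums : List Int) (target : Int) : Int :=
  let lastBad := (PySem.List.enumerate nums).foldl
      (fun acc p => if p.2 ≤ target then p.1 else acc) (-1)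
  let j := max 1 (lastBad + 1)
  if j ≤ (nums.length : Int) - 1 then j else -1

-- ===== PRECONDITION & SPEC =====
def Spec_findSmallestIndex (nums : List Int) (target : Int) (out : Int) : Prop := out = findSmallestIndex_alt nums target
instance (nums : List Int) (target : Int) (out : Int) : Decidable (Spec_findSmallestIndex nums target out) := by unfold Spec_findSmallestIndex; infer_instance

-- ===== CLAIM (what is proved, stated in full; the proofs are below) =====
def Claim_equal_findSmallestIndex : Prop := ∀ (nums : List Int) (target : Int), Dom_findSmallestIndex nums target → Spec_findSmallestIndex nums target (findSmallestIndex nums target)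

-- ===== LEMMAS AND PROOFS =====

-- B's fold, with an arbitrary enumerate start, as a named function for the proofs
def pvLB (target : Int) (xs : List Int) (s acc : Int) : Int :=
  (PySem.List.enumerate xs s).foldl (fun acc p => if p.2 ≤ target then p.1 else acc) acc

theorem pvLB_nil (target s acc : Int) : pvLB target [] s acc = acc := rfl

theorem pvLB_cons (target : Int) (x : Int) (xs : List Int) (s acc : Int) :
    pvLB target (x :: xs) s acc = pvLB target xs (s + 1) (if x ≤ target then s else acc) := by
  simp [pvLB, PySem.List.enumerate_cons]

-- lower bound: the accumulator only grows (given acc < s)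
theorem pvLB_ge (target : Int) (xs : List Int) : ∀ s acc : Int, acc < s → acc ≤ pvLB target xs s acc := by
  induction xs with
  | nil => intro s acc _; simp [pvLB_nil]
  | cons x xs ih =>
    intro s acc h
    rw [pvLB_cons]
    split_ifs with hx
    · exact le_trans (le_of_lt h) (ih (s + 1) s (by omega))
    · exact ih (s + 1) acc (by omega)

-- the result is either the initial accumulator or at least s
theorem pvLB_cases (target : Int) (xs : List Int) : ∀ s acc : Int, acc < s →
    pvLB target xs s acc = acc ∨ s ≤ pvLB target xs s acc := by
  induction xs with
  | nil => intro s acc _; left; rfl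
  | cons x xs ih =>
    intro s acc h
    rw [pvLB_cons]
    split_ifs with hx
    · right; exact pvLB_ge target xs (s + 1) s (by omega)
    · rcases ih (s + 1) acc (by omega) with h1 | h1
      · left; exact h1
      · right; omega

-- the key characterisation: all elements from position m on are > target  ↔  pvLB < s + m
theorem pvLB_char (target : Int) (xs : List Int) : ∀ (m : Nat) (s acc : Int), acc < s + m →
    ((∀ x ∈ xs.drop m, target < x) ↔ pvLB target xs s acc < s + m) := by
  induction xs with
  | nil => intro m s acc h; simp [pvLB_nil]; omega
  | cons x xs ih =>
    intro m s acc h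
    match m with
    | 0 =>
      rw [pvLB_cons]
      simp only [List.drop_zero, Nat.cast_zero, add_zero] at *
      constructor
      · intro hall
        have hx : target < x := hall x List.mem_cons_self
        rw [if_neg (by omega)]
        have := (ih 0 (s + 1) acc (by omega)).mp
          (by intro y hy; exact hall y (List.mem_cons_of_mem _ (by simpa using hy)))
        simp only [Nat.cast_zero, add_zero] at this
        rcases pvLB_cases target xs (s + 1) acc (by omega) with h1 | h1
        · omega
        · omega
      · intro hlt y hy
        by_cases hx : x ≤ target
        · exfalso
          rw [if_pos hx] at hlt
          have := pvLB_ge target xs (s + 1) s (by omega)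
          omega
        · rw [if_neg hx] at hlt
          rcases List.mem_cons.mp hy with rfl | hy'
          · omega
          · have := (ih 0 (s + 1) acc (by omega)).mpr
              (by simp only [Nat.cast_zero, add_zero]; omega)
            simpa using this y (by simpa using hy')
    | m' + 1 =>
      rw [pvLB_cons, List.drop_succ_cons]
      have hacc : (if x ≤ target then s else acc) < (s + 1) + (m' : Int) := by
        split_ifs <;> push_cast at h ⊢ <;> omega
      have := ih m' (s + 1) (if x ≤ target then s else acc) hacc
      push_cast at this ⊢
      constructor
      · intro hall; have := this.mp hall; omega
      · intro hlt; exact this.mpr (by omega)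

theorem pvWhileFlag_iff (target : Int) (r : List Int) :
    pvWhileFlag target r = true ↔ ∀ x ∈ r, target < x := by
  induction r with
  | nil => simp [pvWhileFlag]
  | cons x xs ih =>
    simp only [pvWhileFlag, List.mem_cons]
    split_ifs with hx
    · constructor
      · intro h; exact absurd h (by simp)
      · intro h; exfalso; have := h x (Or.inl rfl); omega
    · rw [ih]
      constructor
      · intro h y hy
        rcases hy with rfl | hy
        · omega
        · exact h y hy
      · intro h y hy; exact h y (Or.inr hy)

-- upper bound on pvLB
theorem pvLB_lt (target : Int) (xs : List Int) : ∀ s acc : Int, acc < s →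
    pvLB target xs s acc < s + xs.length := by
  induction xs with
  | nil => intro s acc h; simp [pvLB_nil]; omega
  | cons x xs ih =>
    intro s acc h
    rw [pvLB_cons]
    have := ih (s + 1) (if x ≤ target then s else acc) (by split_ifs <;> omega)
    simp only [List.length_cons] at *
    push_cast at this ⊢
    omega

-- the main invariant of A's outer loop, in terms of pvLB
theorem pvGoA_eq (nums : List Int) (target : Int) : ∀ (k i : Nat), nums.length - i = k →
    pvGoA nums target i =
      (if max ((i : Int) + 1) (pvLB target nums 0 (-1) + 1) ≤ (nums.length : Int) - 1
       then max ((i : Int) + 1) (pvLB target nums 0 (-1) + 1) else -1) := by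
  intro k
  induction k with
  | zero =>
    intro i hi
    have hin : ¬ i < nums.length := by omega
    rw [pvGoA, dif_neg hin]
    have hub : pvLB target nums 0 (-1) < (nums.length : Int) := by
      have := pvLB_lt target nums 0 (-1) (by omega); simpa using this
    rw [if_neg (by omega)]
  | succ k ih =>
    intro i hi
    have hin : i < nums.length := by omega
    rw [pvGoA, dif_pos hin]
    have hub : pvLB target nums 0 (-1) < (nums.length : Int) := by
      have := pvLB_lt target nums 0 (-1) (by omega); simpa using this
    by_cases hlast : (i : Int) + 1 < (nums.length : Int)
    · -- r = nums.drop (i+1), nonempty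
      have hr : (if (i : Int) + 1 < (nums.length : Int) then
                   PySem.List.slice nums (some ((i : Int) + 1)) none else [])
               = nums.drop (i + 1) := by
        rw [if_pos hlast]
        have : ((i : Int) + 1) = ((i + 1 : Nat) : Int) := by push_cast; ring
        rw [this, PySem.List.slice_from_natCast]
      simp only [hr]
      have hrlen : (nums.drop (i + 1)).length ≠ 0 := by
        simp only [List.length_drop]; omega
      rw [if_neg hrlen]
      have hchar := pvLB_char target nums (i + 1) 0 (-1) (by push_cast; omega)
      simp only [zero_add] at hchar
      by_cases hflag : pvWhileFlag target (nums.drop (i + 1)) = true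
      · rw [if_pos hflag]
        have hlb : pvLB target nums 0 (-1) < (i : Int) + 1 := by
          have := hchar.mp ((pvWhileFlag_iff target _).mp hflag); push_cast at this; omega
        rw [if_pos (by omega)]
        omega
      · rw [if_neg hflag]
        have hlb : ¬ pvLB target nums 0 (-1) < (i : Int) + 1 := by
          intro hc
          exact hflag ((pvWhileFlag_iff target _).mpr (hchar.mpr (by push_cast; omega)))
        rw [ih (i + 1) (by omega)]
        have hlb' : (i : Int) + 1 ≤ pvLB target nums 0 (-1) := by omega
        have hcast : (((i : Nat) + 1 : Nat) : Int) = (i : Int) + 1 := by push_cast; ring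
        rw [hcast]
        have hmax1 : max ((i : Int) + 1) (pvLB target nums 0 (-1) + 1)
                   = pvLB target nums 0 (-1) + 1 := by omega
        have hmax2 : max ((i : Int) + 1 + 1) (pvLB target nums 0 (-1) + 1)
                   = pvLB target nums 0 (-1) + 1 := by omega
        rw [hmax1, hmax2]
    · -- i is the last index: r = [], A returns -1
      rw [if_neg hlast]
      rw [if_pos (by simp : ([] : List Int).length = 0)]
      rw [if_neg (by omega)]

theorem findSmallestIndex_alt_eq (nums : List Int) (target : Int) :
    findSmallestIndex_alt nums target =
      (if max (1 : Int) (pvLB target nums 0 (-1) + 1) ≤ (nums.length : Int) - 1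
       then max (1 : Int) (pvLB target nums 0 (-1) + 1) else -1) := rfl

-- ===== VERDICT (by name: the statement is the Claim_ definition above) =====
theorem findSmallestIndex_spec : Claim_equal_findSmallestIndex := by
  intro nums target _
  unfold Spec_findSmallestIndex findSmallestIndex
  rw [pvGoA_eq nums target nums.length 0 (by omega), findSmallestIndex_alt_eq]
  norm_num
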